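-- pv_equiv track=rewrite | github.com/LivreQuant/contract | projects/source/services/audit_service.py | _compare_param_keys
-- ===== SOURCE A (Python) =====
-- def _compare_param_keys(params_str1: str, params_str2: str) -> bool:
--     """
--     Compare two parameter strings for key equality (regardless of order).
--
--     Args:
--         params_str1: First parameter string
--         params_str2: Second parameter string
--
--     Returns:
--         True if both strings contain the same key-value pairs (ignoring order)
--     """
--     try:
--         # Parse parameter strings into dictionaries
--         def parse_params(params_str):
--             params_dict = {}
--             for param in params_str.split("|"):
--                 if ":" in param:
--                     key, value = param.split(":", 1)
--                     params_dict[key] = value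
--             return params_dict
--
--         dict1 = parse_params(params_str1)
--         dict2 = parse_params(params_str2)
--
--         # Check if all essential keys match (ignore timestamps, etc.)
--         essential_keys = ["user", "book", "book_file"]
--
--         for key in essential_keys:
--             if key in dict1 and key in dict2:
--                 if dict1[key] != dict2[key]:
--                     return False
--             elif key in dict1 or key in dict2:
--                 # One has the key but not the other
--                 return False
--
--         return True
--     except Exception:
--         return False
-- ===== SOURCE B (Python) =====
-- def _last_value(parts, key):
--     """Scan parts for 'key:value' entries; keep the last value seen (dict last-write-wins)."""
--     found = False
--     value = None
--     for part in parts: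
--         if ":" in part:
--             k, v = part.split(":", 1)
--             if k == key:
--                 found = True
--                 value = v
--     return found, value
--
--
-- def _compare_param_keys(params_str1: str, params_str2: str) -> bool:
--     try:
--         parts1 = params_str1.split("|")
--         parts2 = params_str2.split("|")
--         for key in ["user", "book", "book_file"]:
--             f1, v1 = _last_value(parts1, key)
--             f2, v2 = _last_value(parts2, key)
--             if f1 != f2:
--                 return False
--             if f1 and v1 != v2:
--                 return False
--         return True
--     except Exception:
--         return False
-- ===== Notes on version B (the rewrite author's own statement) =====
-- stated objective: alternative
-- what changed: B builds no dictionaries: for each of the three essential keys it scans the '|'-split parts directly, remembering the last 'key:value' match, instead of parsing each string into a dict and looking keys up.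
import Mathlib
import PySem

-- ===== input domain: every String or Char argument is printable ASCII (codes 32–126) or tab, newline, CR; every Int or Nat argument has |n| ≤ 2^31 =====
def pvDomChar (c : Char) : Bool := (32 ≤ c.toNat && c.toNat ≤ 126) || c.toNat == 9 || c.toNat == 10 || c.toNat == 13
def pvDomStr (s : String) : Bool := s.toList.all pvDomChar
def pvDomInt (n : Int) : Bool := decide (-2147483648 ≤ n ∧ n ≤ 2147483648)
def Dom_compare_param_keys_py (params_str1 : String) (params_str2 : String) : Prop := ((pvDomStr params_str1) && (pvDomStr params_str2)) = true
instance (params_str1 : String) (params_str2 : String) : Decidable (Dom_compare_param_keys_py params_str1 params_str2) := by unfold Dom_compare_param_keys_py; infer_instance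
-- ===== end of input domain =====

-- B replaces A's dict-parsing with three direct per-key scans of the '|'-split parts (last match wins); alternative decomposition, same cost.


-- ===== PORT A =====
-- parse_params: split on "|", for each part with ":" split once and overwrite in a dict.
-- split? "|" is always `some` (separator nonempty), so `.getD []` is exact; likewise
-- splitMax? p ":" 1 is always `some [k, v]` when ":" is in p, so the catch-all arm is unreachable.
def pvParseParams (s : String) : PySem.Dict String String :=
  ((PySem.Str.split? s "|").getD []).foldl
    (fun d param =>
      if PySem.Str.isIn ":" param then
        match PySem.Str.splitMax? param ":" 1 with
        | some (k :: v :: _) => d.insert k v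
        | _ => d
      else d)
    PySem.Dict.empty

-- the essential-keys loop of A with its early returns, as structural recursion on the key list;
-- `d[key]` is guarded by `contains`, so comparing the `get?` options is exact.
def pvCheckKeys (d1 d2 : PySem.Dict String String) : List String → Bool
  | [] => true
  | key :: rest =>
    if d1.contains key && d2.contains key then
      if d1.get? key ≠ d2.get? key then false else pvCheckKeys d1 d2 rest
    else if d1.contains key || d2.contains key then false
    else pvCheckKeys d1 d2 rest

-- no exception can occur on String inputs, so the try/except is vacuous
def compare_param_keys_py (params_str1 : String) (params_str2 : String) : Bool :=
  pvCheckKeys (pvParseParams params_str1) (pvParseParams params_str2) ["user", "book", "book_file"]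

-- ===== PORT B =====
-- _last_value: single scan of the parts for 'key:value' entries, keeping the last value seen.
def pvLastValue (parts : List String) (key : String) : Bool × Option String :=
  parts.foldl
    (fun acc part =>
      if PySem.Str.isIn ":" part then
        match PySem.Str.splitMax? part ":" 1 with
        | some (k :: v :: _) => if k == key then (true, some v) else acc
        | _ => acc
      else acc)
    (false, none)

def compare_param_keys_py_alt (params_str1 : String) (params_str2 : String) : Bool :=
  let parts1 := (PySem.Str.split? params_str1 "|").getD []
  let parts2 := (PySem.Str.split? params_str2 "|").getD []
  ["user", "book", "book_file"].all fun key =>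
    let r1 := pvLastValue parts1 key
    let r2 := pvLastValue parts2 key
    if r1.1 != r2.1 then false
    else if r1.1 && (r1.2 != r2.2) then false
    else true

-- ===== PRECONDITION & SPEC =====
def Spec_compare_param_keys_py (params_str1 : String) (params_str2 : String) (out : Bool) : Prop := out = compare_param_keys_py_alt params_str1 params_str2
instance (params_str1 : String) (params_str2 : String) (out : Bool) : Decidable (Spec_compare_param_keys_py params_str1 params_str2 out) := by unfold Spec_compare_param_keys_py; infer_instance

-- ===== CLAIM (what is proved, stated in full; the proofs are below) =====
def Claim_equal_compare_param_keys_py : Prop := ∀ (params_str1 : String) (params_str2 : String), Dom_compare_param_keys_py params_str1 params_str2 → Spec_compare_param_keys_py params_str1 params_str2 (compare_param_keys_py params_str1 params_str2)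

-- ===== LEMMAS AND PROOFS =====

-- B's per-part step, named so the invariant can be stated
def pvStepB (key : String) (acc : Bool × Option String) (part : String) : Bool × Option String :=
  if PySem.Str.isIn ":" part then
    match PySem.Str.splitMax? part ":" 1 with
    | some (k :: v :: _) => if k == key then (true, some v) else acc
    | _ => acc
  else acc

-- A's per-part step
def pvStepA (d : PySem.Dict String String) (param : String) : PySem.Dict String String :=
  if PySem.Str.isIn ":" param then
    match PySem.Str.splitMax? param ":" 1 with
    | some (k :: v :: _) => d.insert k v
    | _ => d
  else d

theorem pvLastValue_eq_get?_aux (key : String) (parts : List String)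
    (d : PySem.Dict String String) :
    parts.foldl (pvStepB key) ((d.get? key).isSome, d.get? key)
      = (((parts.foldl pvStepA d).get? key).isSome, (parts.foldl pvStepA d).get? key) := by
  induction parts generalizing d with
  | nil => rfl
  | cons p ps ih =>
    have hstep : pvStepB key ((d.get? key).isSome, d.get? key) p
        = (((pvStepA d p).get? key).isSome, (pvStepA d p).get? key) := by
      unfold pvStepA pvStepB
      by_cases h : PySem.Str.isIn ":" p = true
      · simp only [h, if_true]
        cases hs : PySem.Str.splitMax? p ":" 1 with
        | none => rfl
        | some l =>
          match l with
          | [] => rfl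
          | [k] => rfl
          | k :: v :: rest =>
            by_cases hk : k = key
            · subst hk
              simp
            · have hkb : (k == key) = false := by simp [hk]
              simp [hkb, PySem.Dict.get?_insert, Ne.symm hk]
      · rw [if_neg h, if_neg h]
    simp only [List.foldl_cons, hstep, ih]

theorem pvLastValue_eq_get? (key : String) (parts : List String) :
    pvLastValue parts key
      = (((parts.foldl pvStepA PySem.Dict.empty).get? key).isSome,
         (parts.foldl pvStepA PySem.Dict.empty).get? key) := by
  have h := pvLastValue_eq_get?_aux key parts PySem.Dict.empty
  rw [PySem.Dict.get?_empty] at h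
  show parts.foldl (pvStepB key) (false, none) = _
  simpa using h

theorem pvParseParams_eq (s : String) :
    pvParseParams s = ((PySem.Str.split? s "|").getD []).foldl pvStepA PySem.Dict.empty := rfl

-- one key of A's loop equals one key of B's `all` body
theorem pvCheckKeys_eq_all (d1 d2 : PySem.Dict String String) (ks : List String) :
    pvCheckKeys d1 d2 ks
      = ks.all (fun key =>
          if ((d1.get? key).isSome : Bool) != ((d2.get? key).isSome : Bool) then false
          else if (d1.get? key).isSome && (d1.get? key != d2.get? key) then false
          else true) := by
  induction ks with
  | nil => rfl
  | cons key rest ih =>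
    simp only [List.all_cons, ← ih, pvCheckKeys, PySem.Dict.contains_eq_isSome_get?]
    cases h1 : d1.get? key <;> cases h2 : d2.get? key
    · simp
    · simp
    · simp
    · rename_i v1 v2
      by_cases hv : v1 = v2 <;> simp [hv]

-- ===== VERDICT (by name: the statement is the Claim_ definition above) =====
theorem compare_param_keys_py_spec : Claim_equal_compare_param_keys_py := by
  intro s1 s2 _
  unfold Spec_compare_param_keys_py compare_param_keys_py compare_param_keys_py_alt
  rw [pvCheckKeys_eq_all]
  simp only [pvLastValue_eq_get?, pvParseParams_eq]
  rfl
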